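-- pv_equiv track=rewrite | github.com/santi-league/santi-league.github.io | src/summarize_v23.py | _extract_furo_tag
-- ===== SOURCE A (Python) =====
-- from typing import Any, Dict, List, Optional, Tuple
--
-- def _extract_furo_tag(token: str) -> Optional[str]:
--     """识别副露标记字符，忽略如 Ryuukyoku 等非副露字符串"""
--     if not isinstance(token, str):
--         return None
--     if token == 'Ryuukyoku':
--         return None
--     if not any(ch.isdigit() for ch in token):
--         return None
--     for ch in token:
--         if ch in ('c', 'p', 'k', 'm'):
--             return ch
--     return None
-- ===== SOURCE B (Python) =====
-- def _extract_furo_tag(token):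
--     """Single pass: track has_digit and the first furo marker simultaneously."""
--     if not isinstance(token, str):
--         return None
--     has_digit = False
--     marker = None
--     for ch in token:
--         if ch.isdigit():
--             has_digit = True
--         elif marker is None and ch in 'cpkm':
--             marker = ch
--     return marker if has_digit else None
-- ===== Notes on version B (the rewrite author's own statement) =====
-- stated objective: simpler
-- what changed: Replaced A's two separate scans (an any() digit scan plus a second marker-search loop) and its redundant digit-free-sentinel special case with one fold tracking has_digit and the first marker in a single pass.
import Mathlib
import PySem

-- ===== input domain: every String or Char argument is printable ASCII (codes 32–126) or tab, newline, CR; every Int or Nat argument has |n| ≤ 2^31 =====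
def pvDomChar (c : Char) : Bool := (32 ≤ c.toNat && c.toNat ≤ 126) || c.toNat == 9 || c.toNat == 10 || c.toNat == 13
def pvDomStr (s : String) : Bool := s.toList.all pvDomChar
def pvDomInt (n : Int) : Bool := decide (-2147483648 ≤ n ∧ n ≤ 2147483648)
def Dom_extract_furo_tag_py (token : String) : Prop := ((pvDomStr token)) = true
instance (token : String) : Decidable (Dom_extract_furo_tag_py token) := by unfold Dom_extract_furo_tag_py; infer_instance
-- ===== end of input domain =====

-- B merges A's two scans (any-digit scan, then marker scan) into one fold; same O(n), simpler.

-- ===== PORT A =====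
def pvIsMarker (ch : Char) : Bool := ch == 'c' || ch == 'p' || ch == 'k' || ch == 'm'

def extract_furo_tag_py (token : String) : Option String :=
  if token = "Ryuukyoku" then none
  else if !(token.toList.any (fun ch => PySem.Chars.isdigit ch)) then none
  else
    match token.toList.find? pvIsMarker with
    | some ch => some (String.ofList [ch])
    | none => none

-- ===== PORT B =====
def pvStepB (st : Bool × Option Char) (ch : Char) : Bool × Option Char :=
  if PySem.Chars.isdigit ch then (true, st.2)
  else if st.2 = none ∧ pvIsMarker ch then (st.1, some ch)
  else st

def extract_furo_tag_py_alt (token : String) : Option String :=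
  let st := token.toList.foldl pvStepB (false, none)
  if st.1 then st.2.map (fun c => String.ofList [c]) else none

-- ===== PRECONDITION & SPEC =====
def Spec_extract_furo_tag_py (token : String) (out : Option String) : Prop := out = extract_furo_tag_py_alt token
instance (token : String) (out : Option String) : Decidable (Spec_extract_furo_tag_py token out) := by unfold Spec_extract_furo_tag_py; infer_instance

-- ===== CLAIM (what is proved, stated in full; the proofs are below) =====
def Claim_equal_extract_furo_tag_py : Prop := ∀ (token : String), Dom_extract_furo_tag_py token → Spec_extract_furo_tag_py token (extract_furo_tag_py token)

-- ===== LEMMAS AND PROOFS =====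

theorem pvIsMarker_of_isdigit (ch : Char) (h : PySem.Chars.isdigit ch = true) :
    pvIsMarker ch = false := by
  simp [PySem.Chars.isdigit, Char.le_def, UInt32.le_iff_toNat_le] at h
  simp [pvIsMarker, Char.ext_iff, UInt32.ext_iff]
  omega

theorem pvLoop (l : List Char) (hd : Bool) (m : Option Char) :
    l.foldl pvStepB (hd, m) =
      (hd || l.any (fun ch => PySem.Chars.isdigit ch),
       match m with | some c => some c | none => l.find? pvIsMarker) := by
  induction l generalizing hd m with
  | nil => cases m <;> simp
  | cons ch t ih =>
    simp only [List.foldl_cons, pvStepB]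
    by_cases hdig : PySem.Chars.isdigit ch = true
    · simp [hdig, ih, List.find?, pvIsMarker_of_isdigit ch hdig]
    · simp only [hdig]
      cases m with
      | some c => simp [ih, hdig, List.any_cons]
      | none =>
        by_cases hm : pvIsMarker ch = true
        · simp [hm, ih, hdig, List.any_cons, List.find?]
        · simp [hm, ih, hdig, List.any_cons, List.find?]

-- ===== VERDICT (by name: the statement is the Claim_ definition above) =====
theorem extract_furo_tag_py_spec : Claim_equal_extract_furo_tag_py := by
  intro token _
  unfold Spec_extract_furo_tag_py extract_furo_tag_py extract_furo_tag_py_alt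
  rw [pvLoop]
  by_cases hR : token = "Ryuukyoku"
  · subst hR; decide
  · simp only [hR, if_false]
    by_cases hany : token.toList.any (fun ch => PySem.Chars.isdigit ch) = true
    · simp only [hany, Bool.not_true, Bool.false_eq_true, if_false, Bool.false_or, if_true]
      cases token.toList.find? pvIsMarker <;> simp
    · simp [hany]
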